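-- pv_equiv track=rewrite | github.com/JackAgren/drone_cones_project | backend/api/drone_operator/views.py | optimal_assignment
-- ===== SOURCE A (Python) =====
-- def optimal_assignment(cone_count, large, med, small, drone_list):
--     LARGE_CAP = 8
--     MEDIUM_CAP = 4
--     SMALL_CAP = 1
--     while cone_count >= 0:
--         if cone_count >= LARGE_CAP and len(large) > 0:
--             drone_list.append(large.pop())
--             cone_count -= LARGE_CAP
--         elif cone_count >= MEDIUM_CAP and len(med) > 0:
--             drone_list.append(med.pop())
--             cone_count -= MEDIUM_CAP
--         elif cone_count >= SMALL_CAP and len(small) > 0: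
--             cone_count -= SMALL_CAP
--             drone_list.append(small.pop())
--         else: #This line is where cone_count is less than a larger size but there are no more smaller drones.
--             return cone_count
--     return cone_count # We reach here if the cones all get drones.
-- ===== SOURCE B (Python) =====
-- def optimal_assignment(cone_count, large, med, small, drone_list):
--     # Three counted phases (large cap 8, med cap 4, small cap 1): once a
--     # category becomes unusable it stays unusable, so the cascading while-loop
--     # collapses into one arithmetic count per category.  Performs the same
--     # tail pops / appends on the argument lists as the original.
--     for lst, cap in ((large, 8), (med, 4), (small, 1)):
--         n = min(len(lst), cone_count // cap) if cone_count >= 0 else 0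
--         for _ in range(n):
--             drone_list.append(lst.pop())
--         cone_count -= cap * n
--     return cone_count
-- ===== Notes on version B (the rewrite author's own statement) =====
-- stated objective: alternative
-- what changed: Replaces the single cascading while-loop (re-testing all three categories every iteration) with three counted phases: for each size largest-first the number of drones to use is computed arithmetically as min(len(lst), cone_count // cap), then exactly that many tail pops are performed; valid because once a category becomes unusable it stays unusable.
import Mathlib
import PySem

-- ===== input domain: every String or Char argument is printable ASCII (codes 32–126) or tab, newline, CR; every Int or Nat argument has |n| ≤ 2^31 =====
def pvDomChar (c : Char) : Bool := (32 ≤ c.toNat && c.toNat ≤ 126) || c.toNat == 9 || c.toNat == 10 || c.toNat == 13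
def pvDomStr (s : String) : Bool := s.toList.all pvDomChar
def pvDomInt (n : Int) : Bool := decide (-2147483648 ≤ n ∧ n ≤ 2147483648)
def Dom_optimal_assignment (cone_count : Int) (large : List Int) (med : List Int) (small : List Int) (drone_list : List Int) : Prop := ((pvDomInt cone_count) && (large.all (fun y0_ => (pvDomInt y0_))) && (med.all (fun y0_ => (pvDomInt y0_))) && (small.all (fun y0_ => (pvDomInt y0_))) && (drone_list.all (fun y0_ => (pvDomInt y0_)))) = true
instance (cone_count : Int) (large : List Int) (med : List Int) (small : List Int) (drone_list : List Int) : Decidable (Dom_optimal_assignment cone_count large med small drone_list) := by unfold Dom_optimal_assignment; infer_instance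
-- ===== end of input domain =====

-- B replaces A's cascading while-loop by three counted phases (count = min(len, cone_count // cap) per
-- size, largest first); both mutate the Python list arguments identically (same tail pops/appends) —
-- the equivalence proved here is about the returned remaining cone_count.


-- ===== PORT A =====
-- literal port of A's while-loop; lst.pop() = take the last element (dropLast / getLastD)
def optimal_assignment (cone_count : Int) (large : List Int) (med : List Int) (small : List Int) (drone_list : List Int) : Int :=
  if cone_count ≥ 0 then
    if cone_count ≥ 8 ∧ large.length > 0 then
      optimal_assignment (cone_count - 8) large.dropLast med small (drone_list ++ [large.getLastD 0])
    else if cone_count ≥ 4 ∧ med.length > 0 then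
      optimal_assignment (cone_count - 4) large med.dropLast small (drone_list ++ [med.getLastD 0])
    else if cone_count ≥ 1 ∧ small.length > 0 then
      optimal_assignment (cone_count - 1) large med small.dropLast (drone_list ++ [small.getLastD 0])
    else cone_count
  else cone_count
termination_by large.length + med.length + small.length
decreasing_by
  · have : large.length > 0 := by omega
    simp [List.length_dropLast]; omega
  · have : med.length > 0 := by omega
    simp [List.length_dropLast]; omega
  · have : small.length > 0 := by omega
    simp [List.length_dropLast]; omega

-- ===== PORT B =====
-- one phase of Source B's for-loop: n = min(len(lst), c // cap) if c >= 0 else 0;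
-- pop n drones off the tail of lst onto dl; c -= cap * n
def oaPhase (st : Int × List Int × List Int) (cap : Int) : Int × List Int × List Int :=
  let c := st.1
  let lst := st.2.1
  let dl := st.2.2
  let n : Int := if c ≥ 0 then min (lst.length : Int) (PySem.Int.floordiv c cap) else 0
  (c - cap * n, lst.take (lst.length - n.toNat), dl ++ (lst.reverse.take n.toNat))

def optimal_assignment_alt (cone_count : Int) (large : List Int) (med : List Int) (small : List Int) (drone_list : List Int) : Int :=
  let p1 := oaPhase (cone_count, large, drone_list) 8
  let p2 := oaPhase (p1.1, med, p1.2.2) 4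
  let p3 := oaPhase (p2.1, small, p2.2.2) 1
  p3.1

-- ===== PRECONDITION & SPEC =====
def Spec_optimal_assignment (cone_count : Int) (large : List Int) (med : List Int) (small : List Int) (drone_list : List Int) (out : Int) : Prop := out = optimal_assignment_alt cone_count large med small drone_list
instance (cone_count : Int) (large : List Int) (med : List Int) (small : List Int) (drone_list : List Int) (out : Int) : Decidable (Spec_optimal_assignment cone_count large med small drone_list out) := by unfold Spec_optimal_assignment; infer_instance

-- ===== CLAIM (what is proved, stated in full; the proofs are below) =====
def Claim_equal_optimal_assignment : Prop := ∀ (cone_count : Int) (large : List Int) (med : List Int) (small : List Int) (drone_list : List Int), Dom_optimal_assignment cone_count large med small drone_list → Spec_optimal_assignment cone_count large med small drone_list (optimal_assignment cone_count large med small drone_list)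

-- ===== LEMMAS AND PROOFS =====

-- the returned cone_count of B, as pure arithmetic on the list lengths (staged per category)
def oaTail2 (c e : Int) : Int := c - 1 * (if c ≥ 0 then min e (c / 1) else 0)
def oaTail (c b e : Int) : Int := oaTail2 (c - 4 * (if c ≥ 0 then min b (c / 4) else 0)) e
def oaCount (c a b e : Int) : Int := oaTail (c - 8 * (if c ≥ 0 then min a (c / 8) else 0)) b e

theorem alt_eq_oaCount (c : Int) (l m s d : List Int) :
    optimal_assignment_alt c l m s d = oaCount c l.length m.length s.length := by
  simp only [optimal_assignment_alt, oaPhase, oaCount, oaTail, oaTail2]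
  by_cases h : c ≥ 0
  · simp only [PySem.Int.floordiv_eq_ediv_of_pos (by norm_num : (0:Int) < 8),
      PySem.Int.floordiv_eq_ediv_of_pos (by norm_num : (0:Int) < 4),
      PySem.Int.floordiv_eq_ediv_of_pos (by norm_num : (0:Int) < 1)]
  · simp [h]

theorem oaCount_large (c a b e : Int) (hc : c ≥ 8) (_ha : 1 ≤ a) :
    oaCount c a b e = oaCount (c - 8) (a - 1) b e := by
  unfold oaCount
  congr 1
  rw [if_pos (by omega), if_pos (by omega)]
  omega

theorem oaCount_skip (c a b e : Int) (hc : c ≥ 0) (h : a = 0 ∨ c < 8) (ha : 0 ≤ a) :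
    oaCount c a b e = oaTail c b e := by
  unfold oaCount
  congr 1
  rw [if_pos hc]
  omega

theorem oaTail_med (c b e : Int) (hc : c ≥ 4) (_hb : 1 ≤ b) :
    oaTail c b e = oaTail (c - 4) (b - 1) e := by
  unfold oaTail
  congr 1
  rw [if_pos (by omega), if_pos (by omega)]
  omega

theorem oaTail_skip (c b e : Int) (hc : c ≥ 0) (h : b = 0 ∨ c < 4) (hb : 0 ≤ b) :
    oaTail c b e = oaTail2 c e := by
  unfold oaTail
  congr 1
  rw [if_pos hc]
  omega

theorem oaTail2_small (c e : Int) (hc : c ≥ 1) (_he : 1 ≤ e) :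
    oaTail2 c e = oaTail2 (c - 1) (e - 1) := by
  unfold oaTail2
  rw [if_pos (by omega), if_pos (by omega)]
  omega

theorem oaTail2_skip (c e : Int) (hc : c ≥ 0) (h : e = 0 ∨ c < 1) (he : 0 ≤ e) :
    oaTail2 c e = c := by
  unfold oaTail2
  rw [if_pos hc]
  omega

theorem oaCount_neg (c a b e : Int) (hc : c < 0) : oaCount c a b e = c := by
  unfold oaCount oaTail oaTail2
  rw [if_neg (by omega)]
  simp only [mul_zero, sub_zero]
  rw [if_neg (by omega), if_neg (by omega)]
  omega

theorem A_eq_oaCount (c : Int) (l m s d : List Int) :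
    optimal_assignment c l m s d = oaCount c l.length m.length s.length := by
  fun_induction optimal_assignment c l m s d with
  | case1 c l m s d h0 h1 ih =>
      rw [ih]
      have hl : l.length > 0 := h1.2
      have hcast : ((l.dropLast.length : Nat) : Int) = (l.length : Int) - 1 := by
        simp [List.length_dropLast]; omega
      rw [hcast, ← oaCount_large _ _ _ _ h1.1 (by omega)]
  | case2 c l m s d h0 h1 h2 ih =>
      rw [ih]
      have hm : m.length > 0 := h2.2
      have hcast : ((m.dropLast.length : Nat) : Int) = (m.length : Int) - 1 := by
        simp [List.length_dropLast]; omega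
      rw [hcast]
      rw [oaCount_skip c _ _ _ h0 (by omega) (by omega),
          oaCount_skip (c - 4) _ _ _ (by omega) (by omega) (by omega),
          ← oaTail_med _ _ _ h2.1 (by omega)]
  | case3 c l m s d h0 h1 h2 h3 ih =>
      rw [ih]
      have hs : s.length > 0 := h3.2
      have hcast : ((s.dropLast.length : Nat) : Int) = (s.length : Int) - 1 := by
        simp [List.length_dropLast]; omega
      rw [hcast]
      rw [oaCount_skip c _ _ _ h0 (by omega) (by omega),
          oaCount_skip (c - 1) _ _ _ (by omega) (by omega) (by omega),
          oaTail_skip c _ _ h0 (by omega) (by omega),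
          oaTail_skip (c - 1) _ _ (by omega) (by omega) (by omega),
          ← oaTail2_small _ _ h3.1 (by omega)]
  | case4 c l m s d h0 h1 h2 h3 =>
      rw [oaCount_skip c _ _ _ h0 (by omega) (by omega),
          oaTail_skip c _ _ h0 (by omega) (by omega),
          oaTail2_skip c _ h0 (by omega) (by omega)]
  | case5 c l m s d h0 =>
      rw [oaCount_neg _ _ _ _ (by omega)]

-- ===== VERDICT (by name: the statement is the Claim_ definition above) =====
theorem optimal_assignment_spec : Claim_equal_optimal_assignment := by
  intro c l m s d _
  unfold Spec_optimal_assignment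
  rw [alt_eq_oaCount, A_eq_oaCount]
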